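-- pv_equiv track=rewrite | github.com/ChrisChan8551/DNSA | structy/structy-js/test.py | deleteProducts
-- ===== SOURCE A (Python) =====
-- def deleteProducts(ids, m):
--     frequency = {}
--     for id in ids:
--         frequency[id] = frequency.get(id, 0) + 1
--
--     counts = sorted(frequency.values())
--
--     while m > 0 and counts:
--         remove = min(counts)
--         if remove > m:
--             break
--
--         m -= remove
--         counts.remove(remove)
--
--     return len(counts)
-- ===== SOURCE B (Python) =====
-- def deleteProducts(ids, m):
--     freq = {}
--     for x in ids:
--         freq[x] = freq.get(x, 0) + 1
--     counts = sorted(freq.values())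
--     removed = 0
--     for c in counts:
--         if m <= 0 or c > m:
--             break
--         m -= c
--         removed += 1
--     return len(counts) - removed
-- ===== Notes on version B (the rewrite author's own statement) =====
-- stated objective: faster
-- what changed: replaces the quadratic while-loop that repeatedly calls min() and list.remove() with a single left-to-right pass over the sorted counts that subtracts while the budget fits
import Mathlib
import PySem

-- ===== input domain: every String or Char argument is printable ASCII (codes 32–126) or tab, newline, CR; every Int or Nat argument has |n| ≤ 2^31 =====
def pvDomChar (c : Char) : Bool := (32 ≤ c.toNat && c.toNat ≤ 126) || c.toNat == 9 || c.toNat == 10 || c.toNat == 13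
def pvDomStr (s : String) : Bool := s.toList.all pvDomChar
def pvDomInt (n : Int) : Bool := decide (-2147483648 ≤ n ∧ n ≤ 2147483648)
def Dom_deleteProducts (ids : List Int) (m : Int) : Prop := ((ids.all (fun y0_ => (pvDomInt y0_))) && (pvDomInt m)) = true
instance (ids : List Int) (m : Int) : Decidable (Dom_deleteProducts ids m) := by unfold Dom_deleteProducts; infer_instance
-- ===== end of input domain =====

-- B replaces A's quadratic min()+remove() deletion loop with one pass over the sorted counts (asymptotically faster).


-- ===== PORT A =====
-- termination helper for the 'counts.remove(remove)' step (cited by the port's decreasing_by)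
theorem pvRemoveLen {xs r : List Int} {v : Int} (h : PySem.List.remove? xs v = some r) :
    r.length < xs.length := by
  induction xs generalizing r with
  | nil => simp [PySem.List.remove?] at h
  | cons x t ih =>
    by_cases hx : x = v
    · subst hx; rw [PySem.List.remove?_cons_self] at h
      cases h; simp
    · rw [PySem.List.remove?_cons_of_ne t hx] at h
      cases ht : PySem.List.remove? t v with
      | none => rw [ht] at h; simp at h
      | some r' =>
        rw [ht] at h; simp at h
        subst h; simpa using Nat.succ_lt_succ (ih ht)

-- while m > 0 and counts: remove = min(counts); if remove > m: break; m -= remove; counts.remove(remove)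
def aLoop (counts : List Int) (m : Int) : Int :=
  if 0 < m ∧ counts ≠ [] then
    match PySem.List.min? counts (fun x => x) with
    | none => (counts.length : Int)        -- unreachable: counts ≠ []
    | some remove =>
      if remove > m then (counts.length : Int)
      else
        match hs : PySem.List.remove? counts remove with
        | none => (counts.length : Int)    -- unreachable: min ∈ counts
        | some rest => aLoop rest (m - remove)
  else (counts.length : Int)
termination_by counts.length
decreasing_by exact pvRemoveLen hs

def deleteProducts (ids : List Int) (m : Int) : Int :=
  let frequency := ids.foldl (fun d id => d.insert id (d.getD id 0 + 1)) PySem.Dict.empty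
  let counts := PySem.List.sorted frequency.values (fun x => x) false
  aLoop counts m

-- ===== PORT B =====
-- for c in counts: if m <= 0 or c > m: break; m -= c; removed += 1  — returns the final 'removed'
def bRemoved (counts : List Int) (m : Int) : Int :=
  match counts with
  | [] => 0
  | c :: rest => if m ≤ 0 ∨ c > m then 0 else 1 + bRemoved rest (m - c)

def deleteProducts_alt (ids : List Int) (m : Int) : Int :=
  let freq := ids.foldl (fun d x => d.insert x (d.getD x 0 + 1)) PySem.Dict.empty
  let counts := PySem.List.sorted freq.values (fun x => x) false
  let removed := bRemoved counts m
  (counts.length : Int) - removed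

-- ===== PRECONDITION & SPEC =====
def Spec_deleteProducts (ids : List Int) (m : Int) (out : Int) : Prop := out = deleteProducts_alt ids m
instance (ids : List Int) (m : Int) (out : Int) : Decidable (Spec_deleteProducts ids m out) := by unfold Spec_deleteProducts; infer_instance

-- ===== CLAIM (what is proved, stated in full; the proofs are below) =====
def Claim_equal_deleteProducts : Prop := ∀ (ids : List Int) (m : Int), Dom_deleteProducts ids m → Spec_deleteProducts ids m (deleteProducts ids m)

-- ===== LEMMAS AND PROOFS =====

-- foldl min over a list the seed already bounds is the seed
theorem pvFoldlMin (t : List Int) (c : Int) (h : ∀ y ∈ t, c ≤ y) : t.foldl min c = c := by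
  induction t with
  | nil => rfl
  | cons y ys ih =>
    simp only [List.foldl_cons]
    rw [min_eq_left (h y (by simp))]
    exact ih (fun z hz => h z (by simp [hz]))

-- on a ≤-sorted nonempty list, min is the head
theorem pvMinHead (c : Int) (rest : List Int) (hs : (c :: rest).Pairwise (· ≤ ·)) :
    PySem.List.min? (c :: rest) (fun x => x) = some c := by
  rw [PySem.List.min?_id_cons]
  have : ∀ y ∈ rest, c ≤ y := (List.pairwise_cons.mp hs).1
  rw [pvFoldlMin rest c this]

-- core: on a sorted list, A's min+remove loop counts the same survivors as B's pass
theorem pvLoopEq (counts : List Int) (m : Int) (hs : counts.Pairwise (· ≤ ·)) :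
    aLoop counts m = (counts.length : Int) - bRemoved counts m := by
  induction counts generalizing m with
  | nil => simp [aLoop, bRemoved]
  | cons c rest ih =>
    rw [aLoop]
    by_cases hm : 0 < m
    · simp only [hm, ne_eq, reduceCtorEq, not_false_eq_true, and_self, if_true]
      rw [pvMinHead c rest hs]
      by_cases hc : c > m
      · simp [bRemoved, hc]
      · simp only [hc, if_false]
        rw [PySem.List.remove?_cons_self]
        show aLoop rest (m - c) = _
        rw [ih (m - c) (List.Pairwise.sublist (List.sublist_cons_self c rest) hs)]
        simp only [bRemoved, hc]
        rw [if_neg (by simp; omega : ¬ (m ≤ 0 ∨ False))]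
        simp; ring
    · have : ¬ (0 < m ∧ (c :: rest) ≠ []) := by tauto
      rw [if_neg this]
      simp [bRemoved, not_lt.mp hm]

-- ===== VERDICT (by name: the statement is the Claim_ definition above) =====
theorem deleteProducts_spec : Claim_equal_deleteProducts := by
  intro ids m _
  unfold Spec_deleteProducts deleteProducts deleteProducts_alt
  simp only
  exact pvLoopEq _ m (by simpa using PySem.List.sorted_pairwise _ _)
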